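-- pv_equiv track=rewrite | github.com/arcowie/adventOfCode2023Sols | day1/day1Sol2.py | checkForWordDigit
-- ===== SOURCE A (Python) =====
-- def checkForWordDigit(line, pos):
--     line=line.lower()
--     listToSubIndex=[]
--
--     substStrings=[
--         ("one", "1"),
--         ("two", "2"),
--         ("three", "3"),
--         ("four", "4"),
--         ("five", "5"),
--         ("six", "6"),
--         ("seven", "7"),
--         ("eight", "8"),
--         ("nine", "9")
--     ]
--
--     origline=line
--     for text, num in substStrings:
--         if pos == "left":
--             index = line.find(text)
--             reverse = False
--         else:
--             try:
--                 reverse = True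
--                 index = line.rindex(text)
--             except ValueError:
--                 continue
--         if index !=-1:
--             listToSubIndex.append((index, text, num))
--     listToSubIndex=sorted(listToSubIndex, reverse=reverse)
--
--     if len(listToSubIndex) > 0:
--         return listToSubIndex[0][0], listToSubIndex[0][2]
--     else:
--         return None, None
-- ===== SOURCE B (Python) =====
-- def checkForWordDigit(line, pos):
--     line = line.lower()
--     words = {
--         "one": "1", "two": "2", "three": "3", "four": "4", "five": "5",
--         "six": "6", "seven": "7", "eight": "8", "nine": "9",
--     }
--     if pos == "left":
--         indices = range(len(line))
--     else:
--         indices = range(len(line) - 1, -1, -1)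
--     for i in indices:
--         for word, digit in words.items():
--             if line.startswith(word, i):
--                 return i, digit
--     return None, None
-- ===== Notes on version B (the rewrite author's own statement) =====
-- stated objective: idiomatic
-- what changed: B scans string positions (left-to-right or right-to-left) and returns at the first position where some digit word starts, instead of A's loop over the nine words collecting find/rindex results and sorting the triples.
import Mathlib
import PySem

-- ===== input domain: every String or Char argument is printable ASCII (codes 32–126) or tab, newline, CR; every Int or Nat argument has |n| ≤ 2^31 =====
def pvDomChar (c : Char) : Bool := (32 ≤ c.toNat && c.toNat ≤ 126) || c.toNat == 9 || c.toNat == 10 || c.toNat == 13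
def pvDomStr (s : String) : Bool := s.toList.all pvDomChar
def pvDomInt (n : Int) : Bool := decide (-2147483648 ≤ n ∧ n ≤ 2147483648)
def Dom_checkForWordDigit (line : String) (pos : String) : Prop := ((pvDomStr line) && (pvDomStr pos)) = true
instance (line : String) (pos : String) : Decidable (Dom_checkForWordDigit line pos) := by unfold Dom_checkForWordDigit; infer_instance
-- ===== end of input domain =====

-- B replaces A's word-by-word find/rindex collection plus sort by a single scan over
-- string positions returning at the first/last position where a digit word starts (idiomatic).

-- ===== PORT A =====
-- substStrings of A, as (word, digit) pairs over List Char.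
def pvWords : List (List Char × String) :=
  [("one".toList, "1"), ("two".toList, "2"), ("three".toList, "3"),
   ("four".toList, "4"), ("five".toList, "5"), ("six".toList, "6"),
   ("seven".toList, "7"), ("eight".toList, "8"), ("nine".toList, "9")]

-- A's loop body: `index = line.find(text)` (left) or `line.rindex(text)` (right; the
-- try/except ValueError `continue` is exactly rfind = -1), then `if index != -1: append`.
-- Python re-assigns `reverse = (pos != "left")` on every iteration of the loop; the port
-- passes that constant value to `sorted` directly. Python sorts the (index, text, num)
-- triples lexicographically; the index components are pairwise distinct on every input
-- (no two digit words can start at the same position — lemma pvWords_unique below), so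
-- the stable sort keyed on the index alone is exact.
def checkForWordDigit (line : String) (pos : String) : Option Int × Option String :=
  let l := (PySem.Str.lower line).toList
  if pos == "left" then
    let cands := pvWords.foldl (fun acc tn =>
      if (PySem.Chars.find l tn.1 != -1) = true then acc ++ [(PySem.Chars.find l tn.1, tn.1, tn.2)] else acc) []
    match PySem.List.sorted cands (fun x => x.1) false with
    | [] => (none, none)
    | m :: _ => (some m.1, some m.2.2)
  else
    let cands := pvWords.foldl (fun acc tn =>
      if (PySem.Chars.rfind l tn.1 != -1) = true then acc ++ [(PySem.Chars.rfind l tn.1, tn.1, tn.2)] else acc) []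
    match PySem.List.sorted cands (fun x => x.1) true with
    | [] => (none, none)
    | m :: _ => (some m.1, some m.2.2)

-- ===== PORT B =====
-- left scan: positions i = 0, 1, … over the suffixes of l (line.startswith(word, i)).
def pvScanL : List Char → Nat → Option Int × Option String
  | [], _ => (none, none)
  | c :: rest, i =>
    match pvWords.find? (fun tn => PySem.Chars.startswith (c :: rest) tn.1) with
    | some tn => (some (i : Int), some tn.2)
    | none => pvScanL rest (i + 1)

-- right scan: positions i = len-1, len-2, …, 0.
def pvScanR (l : List Char) : Nat → Option Int × Option String
  | 0 =>
    match pvWords.find? (fun tn => PySem.Chars.startswith l tn.1) with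
    | some tn => (some (0 : Int), some tn.2)
    | none => (none, none)
  | i + 1 =>
    match pvWords.find? (fun tn => PySem.Chars.startswith (l.drop (i + 1)) tn.1) with
    | some tn => (some ((i + 1 : Nat) : Int), some tn.2)
    | none => pvScanR l i

def checkForWordDigit_alt (line : String) (pos : String) : Option Int × Option String :=
  let l := (PySem.Str.lower line).toList
  if pos == "left" then pvScanL l 0
  else pvScanR l (l.length - 1)

-- ===== PRECONDITION & SPEC =====
def Spec_checkForWordDigit (line : String) (pos : String) (out : Option Int × Option String) : Prop := out = checkForWordDigit_alt line pos
instance (line : String) (pos : String) (out : Option Int × Option String) : Decidable (Spec_checkForWordDigit line pos out) := by unfold Spec_checkForWordDigit; infer_instance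

-- ===== CLAIM (what is proved, stated in full; the proofs are below) =====
def Claim_equal_checkForWordDigit : Prop := ∀ (line : String) (pos : String), Dom_checkForWordDigit line pos → Spec_checkForWordDigit line pos (checkForWordDigit line pos)

-- ===== LEMMAS AND PROOFS =====

-- matches at position j (B's inner loop).
def pvMatchAt (l : List Char) (j : Nat) : Option (List Char × String) :=
  pvWords.find? (fun tn => PySem.Chars.startswith (l.drop j) tn.1)

theorem pvWords_ne_nil : ∀ tn ∈ pvWords, tn.1 ≠ [] := by decide

theorem pvWords_no_prefix : ∀ tn1 ∈ pvWords, ∀ tn2 ∈ pvWords, tn1.1 <+: tn2.1 → tn1 = tn2 := by decide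

-- at most one digit word starts at a given place
theorem pvWords_unique {s : List Char} {tn1 tn2 : List Char × String}
    (h1 : tn1 ∈ pvWords) (h2 : tn2 ∈ pvWords)
    (hp1 : tn1.1 <+: s) (hp2 : tn2.1 <+: s) : tn1 = tn2 := by
  rcases List.prefix_or_prefix_of_prefix hp1 hp2 with h | h
  · exact pvWords_no_prefix tn1 h1 tn2 h2 h
  · exact (pvWords_no_prefix tn2 h2 tn1 h1 h).symm

theorem pvMatchAt_some {l : List Char} {j : Nat} {tn : List Char × String}
    (h : tn ∈ pvWords) (hp : tn.1 <+: l.drop j) : pvMatchAt l j = some tn := by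
  unfold pvMatchAt
  cases hfind : pvWords.find? (fun tn => PySem.Chars.startswith (l.drop j) tn.1) with
  | none =>
    exact absurd ((PySem.Chars.startswith_iff _ _).mpr hp)
      (by simpa using List.find?_eq_none.mp hfind tn h)
  | some z =>
    have hz := List.find?_some hfind
    have hzmem := List.mem_of_find?_eq_some hfind
    have : z = tn :=
      pvWords_unique hzmem h ((PySem.Chars.startswith_iff _ _).mp hz) hp
    rw [this]

theorem pvMatchAt_none {l : List Char} {j : Nat}
    (h : ∀ tn ∈ pvWords, ¬ tn.1 <+: l.drop j) : pvMatchAt l j = none := by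
  unfold pvMatchAt
  exact List.find?_eq_none.mpr fun tn hmem => by
    simpa [PySem.Chars.startswith_iff] using h tn hmem

theorem pvPrefix_drop_lt {sub l : List Char} {j : Nat} (h : sub <+: l.drop j)
    (hne : sub ≠ []) : j < l.length := by
  by_contra hc
  rw [List.drop_eq_nil_of_le (by omega)] at h
  exact hne (List.prefix_nil.mp h)

theorem pvScanL_none (l : List Char) (k : Nat)
    (h : ∀ j, k ≤ j → pvMatchAt l j = none) : pvScanL (l.drop k) k = (none, none) := by
  obtain ⟨n, hn⟩ : ∃ n, l.length - k = n := ⟨_, rfl⟩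
  induction n generalizing k with
  | zero =>
    rw [List.drop_eq_nil_of_le (by omega)]
    rfl
  | succ n ih =>
    have hk' : k < l.length := by omega
    rw [List.drop_eq_getElem_cons hk']
    have hmk : pvMatchAt l k = none := h k le_rfl
    unfold pvMatchAt at hmk
    simp only [pvScanL, List.getElem_cons_drop, hmk]
    exact ih (k + 1) (fun j hj => h j (by omega)) (by omega)

theorem pvScanL_found (l : List Char) (k j : Nat) (tn : List Char × String) (hkj : k ≤ j)
    (hm : pvMatchAt l j = some tn)
    (hmin : ∀ j', k ≤ j' → j' < j → pvMatchAt l j' = none) :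
    pvScanL (l.drop k) k = (some (j : Int), some tn.2) := by
  have hm' := hm
  unfold pvMatchAt at hm'
  have htn := List.mem_of_find?_eq_some hm'
  have hsw : PySem.Chars.startswith (l.drop j) tn.1 = true := List.find?_some (p := fun tn : List Char × String => PySem.Chars.startswith (l.drop j) tn.1) hm'
  have hpfx := (PySem.Chars.startswith_iff _ _).mp hsw
  have hjlt : j < l.length :=
    pvPrefix_drop_lt hpfx (pvWords_ne_nil tn htn)
  obtain ⟨n, hn⟩ : ∃ n, j - k = n := ⟨_, rfl⟩
  induction n generalizing k with
  | zero =>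
    have hjk : j = k := by omega
    subst hjk
    rw [List.drop_eq_getElem_cons hjlt]
    simp only [pvScanL, List.getElem_cons_drop, hm']
  | succ n ih =>
    have hk' : k < l.length := by omega
    have hmk : pvMatchAt l k = none := hmin k le_rfl (by omega)
    unfold pvMatchAt at hmk
    rw [List.drop_eq_getElem_cons hk']
    simp only [pvScanL, List.getElem_cons_drop, hmk]
    exact ih (k + 1) (by omega) (fun j' h1 h2 => hmin j' (by omega) h2) (by omega)

theorem pvScanR_none (l : List Char) (k : Nat)
    (h : ∀ j, j ≤ k → pvMatchAt l j = none) : pvScanR l k = (none, none) := by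
  induction k with
  | zero =>
    have h0 := h 0 le_rfl
    unfold pvMatchAt at h0
    rw [List.drop_zero] at h0
    simp [pvScanR, h0]
  | succ k ih =>
    have hk := h (k + 1) le_rfl
    unfold pvMatchAt at hk
    simpa [pvScanR, hk] using ih (fun j hj => h j (by omega))

theorem pvScanR_found (l : List Char) (k j : Nat) (tn : List Char × String) (hj : j ≤ k)
    (hm : pvMatchAt l j = some tn)
    (hmax : ∀ j', j < j' → j' ≤ k → pvMatchAt l j' = none) :
    pvScanR l k = (some (j : Int), some tn.2) := by
  induction k with
  | zero =>
    have hj0 : j = 0 := by omega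
    subst hj0
    unfold pvMatchAt at hm
    rw [List.drop_zero] at hm
    simp [pvScanR, hm]
  | succ k ih =>
    by_cases hjk : j = k + 1
    · subst hjk
      unfold pvMatchAt at hm
      simp [pvScanR, hm]
    · have hk : pvMatchAt l (k + 1) = none := hmax (k + 1) (by omega) le_rfl
      unfold pvMatchAt at hk
      simpa [pvScanR, hk] using
        ih (by omega) (fun j' h1 h2 => hmax j' h1 (by omega))

-- rfind characterisation, from the definition of PySem.Chars.rfind.go (no library lemma covers rfind)
theorem pvRfind_go_spec (s sub : List Char) (n : Nat) :
    (PySem.Chars.rfind.go s sub n = -1 ∧ ∀ i ≤ n, ¬ sub <+: s.drop i) ∨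
    (∃ j ≤ n, PySem.Chars.rfind.go s sub n = (j : Int) ∧ sub <+: s.drop j ∧
      ∀ i, j < i → i ≤ n → ¬ sub <+: s.drop i) := by
  induction n with
  | zero =>
    by_cases h : sub <+: s
    · exact Or.inr ⟨0, le_rfl, by simp [PySem.Chars.rfind.go, List.isPrefixOf_iff_prefix, h],
        by simpa using h, fun i h1 h2 => by omega⟩
    · exact Or.inl ⟨by simp [PySem.Chars.rfind.go, List.isPrefixOf_iff_prefix, h],
        fun i hi => by interval_cases i; simpa using h⟩
  | succ n ih =>
    by_cases h : sub <+: s.drop (n + 1)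
    · exact Or.inr ⟨n + 1, le_rfl,
        by simp [PySem.Chars.rfind.go, List.isPrefixOf_iff_prefix, h],
        h, fun i h1 h2 => by omega⟩
    · have hgo : PySem.Chars.rfind.go s sub (n + 1) = PySem.Chars.rfind.go s sub n := by
        simp [PySem.Chars.rfind.go, List.isPrefixOf_iff_prefix, h]
      rcases ih with ⟨he, hall⟩ | ⟨j, hj, he, hp, hmax⟩
      · refine Or.inl ⟨hgo.trans he, fun i hi => ?_⟩
        rcases Nat.lt_or_ge i (n + 1) with hi' | hi'
        · exact hall i (by omega)
        · have : i = n + 1 := by omega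
          simpa [this] using h
      · refine Or.inr ⟨j, by omega, hgo.trans he, hp, fun i h1 h2 => ?_⟩
        rcases Nat.lt_or_ge i (n + 1) with hi' | hi'
        · exact hmax i h1 (by omega)
        · have : i = n + 1 := by omega
          simpa [this] using h

-- rfind over the whole string: either no occurrence anywhere, or the highest one
theorem pvRfind_spec (s sub : List Char) (hne : sub ≠ []) :
    (PySem.Chars.rfind s sub = -1 ∧ ∀ i : Nat, ¬ sub <+: s.drop i) ∨
    (∃ j : Nat, PySem.Chars.rfind s sub = (j : Int) ∧ j < s.length ∧ sub <+: s.drop j ∧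
      ∀ i : Nat, j < i → ¬ sub <+: s.drop i) := by
  have hspec := pvRfind_go_spec s sub s.length
  rcases hspec with ⟨he, hall⟩ | ⟨j, hj, he, hp, hmax⟩
  · refine Or.inl ⟨he, fun i hi => ?_⟩
    rcases Nat.lt_or_ge i (s.length + 1) with hi' | hi'
    · exact hall i (by omega) hi
    · exact hne (List.prefix_nil.mp (by simpa [List.drop_eq_nil_of_le (by omega : s.length ≤ i)] using hi))
  · refine Or.inr ⟨j, he, pvPrefix_drop_lt hp hne, hp, fun i h1 hi => ?_⟩
    rcases Nat.lt_or_ge i (s.length + 1) with hi' | hi'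
    · exact hmax i h1 (by omega) hi
    · exact hne (List.prefix_nil.mp (by simpa [List.drop_eq_nil_of_le (by omega : s.length ≤ i)] using hi))

-- ===== VERDICT (by name: the statement is the Claim_ definition above) =====
-- key facts assembled once for the left branch
theorem pvLeft_eq (l : List Char) :
    (match PySem.List.sorted
        (pvWords.foldl (fun acc tn =>
          if (PySem.Chars.find l tn.1 != -1) = true then acc ++ [(PySem.Chars.find l tn.1, tn.1, tn.2)] else acc) [])
        (fun x => x.1) false with
      | [] => ((none : Option Int), (none : Option String))
      | m :: _ => (some m.1, some m.2.2)) = pvScanL l 0 := by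
  have hfold := PySem.List.foldl_append_if
    (fun tn : List Char × String => PySem.Chars.find l tn.1 != -1)
    (fun tn : List Char × String => (PySem.Chars.find l tn.1, tn.1, tn.2)) pvWords []
  rw [hfold, List.nil_append]
  set p := fun tn : List Char × String => PySem.Chars.find l tn.1 != -1 with hp
  set f := fun tn : List Char × String => (PySem.Chars.find l tn.1, tn.1, tn.2) with hf
  cases hsort : PySem.List.sorted ((pvWords.filter p).map f) (fun x => x.1) false with
  | nil =>
    have hc : (pvWords.filter p).map f = [] := (PySem.List.sorted_eq_nil_iff _ _ _).mp hsort
    have hfil : ∀ tn ∈ pvWords, ¬ p tn = true :=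
      List.filter_eq_nil_iff.mp (List.map_eq_nil_iff.mp hc)
    have hnone : ∀ j, 0 ≤ j → pvMatchAt l j = none := by
      intro j _
      apply pvMatchAt_none
      intro tn hmem hpre
      have hinf : tn.1 <:+: l := hpre.isInfix.trans (l.drop_suffix j).isInfix
      exact hfil tn hmem (by simpa [hp] using (PySem.Chars.find_ne_neg_one_iff l tn.1).mpr hinf)
    have := pvScanL_none l 0 hnone
    rw [List.drop_zero] at this
    exact this.symm
  | cons m t =>
    have hmem : m ∈ (pvWords.filter p).map f :=
      (PySem.List.mem_sorted _ _ _ m).mp (hsort ▸ List.mem_cons_self)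
    obtain ⟨tn, htnf, hftn⟩ := List.mem_map.mp hmem
    obtain ⟨htnW, htnp⟩ := List.mem_filter.mp htnf
    have hne : PySem.Chars.find l tn.1 ≠ -1 := by simpa [hp] using htnp
    have h0 : 0 ≤ PySem.Chars.find l tn.1 := by
      have := PySem.Chars.neg_one_le_find l tn.1
      omega
    have hspec := PySem.Chars.find_spec (s := l) (sub := tn.1) h0
    set j := (PySem.Chars.find l tn.1).toNat with hjdef
    have hj : (j : Int) = PySem.Chars.find l tn.1 := Int.toNat_of_nonneg h0
    have hmatch : pvMatchAt l j = some tn := pvMatchAt_some htnW hspec.1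
    have hmin : ∀ j', 0 ≤ j' → j' < j → pvMatchAt l j' = none := by
      intro j' _ hj'
      apply pvMatchAt_none
      intro tn' hmem' hpre'
      have hinf' : tn'.1 <:+: l := hpre'.isInfix.trans (l.drop_suffix j').isInfix
      have h0' : 0 ≤ PySem.Chars.find l tn'.1 := (PySem.Chars.find_nonneg_iff l tn'.1).mpr hinf'
      have hcand : f tn' ∈ (pvWords.filter p).map f := by
        refine List.mem_map_of_mem (List.mem_filter.mpr ⟨hmem', ?_⟩)
        simp only [hp]
        simpa using (PySem.Chars.find_ne_neg_one_iff l tn'.1).mpr hinf'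
      have hle : m.1 ≤ (f tn').1 := PySem.List.key_head_sorted_le _ _ hsort (f tn') hcand
      have hfle : (PySem.Chars.find l tn'.1).toNat ≤ j' := by
        by_contra hcon
        exact (PySem.Chars.find_spec h0').2 j' (by omega) hpre'
      have hm1 : m.1 = PySem.Chars.find l tn.1 := by rw [← hftn]
      simp only [hf] at hle
      omega
    have := pvScanL_found l 0 j tn (Nat.zero_le j) hmatch hmin
    rw [List.drop_zero] at this
    rw [this, ← hftn]
    simp [hf, hj]

-- key facts assembled once for the right branch
theorem pvRight_eq (l : List Char) :
    (match PySem.List.sorted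
        (pvWords.foldl (fun acc tn =>
          if (PySem.Chars.rfind l tn.1 != -1) = true then acc ++ [(PySem.Chars.rfind l tn.1, tn.1, tn.2)] else acc) [])
        (fun x => x.1) true with
      | [] => ((none : Option Int), (none : Option String))
      | m :: _ => (some m.1, some m.2.2)) = pvScanR l (l.length - 1) := by
  have hfold := PySem.List.foldl_append_if
    (fun tn : List Char × String => PySem.Chars.rfind l tn.1 != -1)
    (fun tn : List Char × String => (PySem.Chars.rfind l tn.1, tn.1, tn.2)) pvWords []
  rw [hfold, List.nil_append]
  set p := fun tn : List Char × String => PySem.Chars.rfind l tn.1 != -1 with hp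
  set f := fun tn : List Char × String => (PySem.Chars.rfind l tn.1, tn.1, tn.2) with hf
  cases hsort : PySem.List.sorted ((pvWords.filter p).map f) (fun x => x.1) true with
  | nil =>
    have hc : (pvWords.filter p).map f = [] := (PySem.List.sorted_eq_nil_iff _ _ _).mp hsort
    have hfil : ∀ tn ∈ pvWords, ¬ p tn = true :=
      List.filter_eq_nil_iff.mp (List.map_eq_nil_iff.mp hc)
    have hnone : ∀ j, j ≤ l.length - 1 → pvMatchAt l j = none := by
      intro j _
      apply pvMatchAt_none
      intro tn hmem hpre
      rcases pvRfind_spec l tn.1 (pvWords_ne_nil tn hmem) with ⟨_, hall⟩ | ⟨j', he, _, _, _⟩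
      · exact hall j hpre
      · exact hfil tn hmem (by simp [hp, he])
    exact (pvScanR_none l (l.length - 1) hnone).symm
  | cons m t =>
    have hmem : m ∈ (pvWords.filter p).map f :=
      (PySem.List.mem_sorted _ _ _ m).mp (hsort ▸ List.mem_cons_self)
    obtain ⟨tn, htnf, hftn⟩ := List.mem_map.mp hmem
    obtain ⟨htnW, htnp⟩ := List.mem_filter.mp htnf
    have hne : PySem.Chars.rfind l tn.1 ≠ -1 := by simpa [hp] using htnp
    rcases pvRfind_spec l tn.1 (pvWords_ne_nil tn htnW) with ⟨he, _⟩ | ⟨j, he, hjlt, hpre, hmaxw⟩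
    · exact absurd he hne
    · have hmatch : pvMatchAt l j = some tn := pvMatchAt_some htnW hpre
      have hmax : ∀ j', j < j' → j' ≤ l.length - 1 → pvMatchAt l j' = none := by
        intro j' hjj' hj'
        apply pvMatchAt_none
        intro tn' hmem' hpre'
        rcases pvRfind_spec l tn'.1 (pvWords_ne_nil tn' hmem') with ⟨_, hall⟩ | ⟨j'', he', _, _, hmaxw'⟩
        · exact hall j' hpre'
        · have hcand : f tn' ∈ (pvWords.filter p).map f := by
            refine List.mem_map_of_mem (List.mem_filter.mpr ⟨hmem', ?_⟩)
            simp [hp, he']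
          have hle : (f tn').1 ≤ m.1 := PySem.List.key_head_sorted_rev_ge _ _ hsort (f tn') hcand
          have hj'le : j' ≤ j'' := by
            by_contra hcon
            exact hmaxw' j' (by omega) hpre'
          have hm1 : m.1 = PySem.Chars.rfind l tn.1 := by rw [← hftn]
          simp only [hf] at hle
          rw [hm1, he] at hle
          rw [he'] at hle
          have : j'' ≤ j := by exact_mod_cast hle
          omega
      have := pvScanR_found l (l.length - 1) j tn (by omega) hmatch hmax
      rw [this, ← hftn]
      simp [hf, he]

-- ===== VERDICT continued =====
theorem checkForWordDigit_spec : Claim_equal_checkForWordDigit := by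
  intro line pos _
  unfold Spec_checkForWordDigit checkForWordDigit checkForWordDigit_alt
  by_cases hpos : (pos == "left") = true
  · simp only [hpos, if_true]
    exact pvLeft_eq (PySem.Str.lower line).toList
  · simp only [hpos, if_false, Bool.false_eq_true]
    exact pvRight_eq (PySem.Str.lower line).toList
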